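-- pv_equiv track=rewrite | github.com/gloudstoun/python-practice-tasks | control_flow/sum_between_zeros.py | sum_elements_between_zeros
-- ===== SOURCE A (Python) =====
-- def sum_elements_between_zeros(numbers):
--     result_sum = 0
--     first_zero_index = None
--     second_zero_index = None
--
--     for i, numer in enumerate(numbers):
--         if numer == 0:
--             first_zero_index = i
--             break
--     if first_zero_index == None:
--         return 0
--
--     for i in range(first_zero_index + 1, len(numbers)):
--         if numbers[i] == 0:
--             second_zero_index = i
--             break
--     if second_zero_index == None:
--         return 0
--
--     for i in range(first_zero_index + 1, second_zero_index):
--         result_sum += numbers[i]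
--
--     return result_sum
-- ===== SOURCE B (Python) =====
-- def sum_elements_between_zeros(numbers):
--     seen = 0
--     total = 0
--     for x in numbers:
--         if x == 0:
--             seen += 1
--             if seen == 2:
--                 return total
--         elif seen == 1:
--             total += x
--     return 0
-- ===== Notes on version B (the rewrite author's own statement) =====
-- stated objective: simpler
-- what changed: Replaces the three sequential passes (find first zero by enumerate, find second zero by index scan, then an index loop summing the slice) with a single state-machine pass that counts zeros seen and accumulates the running sum on the fly, returning it at the second zero.
import Mathlib
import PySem

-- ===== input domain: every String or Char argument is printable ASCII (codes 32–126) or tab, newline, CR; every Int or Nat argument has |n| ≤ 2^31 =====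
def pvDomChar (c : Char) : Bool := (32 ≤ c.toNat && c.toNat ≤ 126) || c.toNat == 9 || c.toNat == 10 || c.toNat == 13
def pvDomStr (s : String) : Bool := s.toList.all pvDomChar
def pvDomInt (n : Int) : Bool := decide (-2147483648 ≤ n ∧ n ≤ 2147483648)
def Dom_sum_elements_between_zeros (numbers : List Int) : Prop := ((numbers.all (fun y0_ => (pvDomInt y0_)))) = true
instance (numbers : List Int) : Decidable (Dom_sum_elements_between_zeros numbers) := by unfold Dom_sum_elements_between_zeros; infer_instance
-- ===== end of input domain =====

-- B replaces A's three sequential passes by one state-machine pass (simpler decomposition, same O(n) cost).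

-- ===== PORT A =====
-- first loop: `for i, numer in enumerate(numbers): if numer == 0: first_zero_index = i; break`
def pvFindFirstZero : List Int → Nat → Option Nat
  | [], _ => none
  | x :: xs, i => if x = 0 then some i else pvFindFirstZero xs (i + 1)

-- second loop: `for i in range(first_zero_index + 1, len(numbers)): if numbers[i] == 0: …; break`
-- (numbers[i] is always in range here, so getD i 0 is exact for Python's numbers[i])
def pvFindSecondZero (numbers : List Int) (i : Nat) : Option Nat :=
  if _h : i < numbers.length then
    if numbers.getD i 0 = 0 then some i else pvFindSecondZero numbers (i + 1)
  else none
termination_by numbers.length - i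

-- third loop: `for i in range(first_zero_index + 1, second_zero_index): result_sum += numbers[i]`
def pvSumRange (numbers : List Int) (i stop : Nat) (acc : Int) : Int :=
  if i < stop then pvSumRange numbers (i + 1) stop (acc + numbers.getD i 0) else acc
termination_by stop - i

def sum_elements_between_zeros (numbers : List Int) : Int :=
  match pvFindFirstZero numbers 0 with
  | none => 0
  | some f =>
    match pvFindSecondZero numbers (f + 1) with
    | none => 0
    | some s => pvSumRange numbers (f + 1) s 0

-- ===== PORT B =====
def pvAltLoop : List Int → Nat → Int → Int
  | [], _, _ => 0
  | x :: xs, seen, total =>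
    if x = 0 then
      if seen + 1 = 2 then total else pvAltLoop xs (seen + 1) total
    else if seen = 1 then pvAltLoop xs seen (total + x)
    else pvAltLoop xs seen total

def sum_elements_between_zeros_alt (numbers : List Int) : Int := pvAltLoop numbers 0 0

-- ===== PRECONDITION & SPEC =====
def Spec_sum_elements_between_zeros (numbers : List Int) (out : Int) : Prop := out = sum_elements_between_zeros_alt numbers
instance (numbers : List Int) (out : Int) : Decidable (Spec_sum_elements_between_zeros numbers out) := by unfold Spec_sum_elements_between_zeros; infer_instance

-- ===== CLAIM (what is proved, stated in full; the proofs are below) =====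
def Claim_equal_sum_elements_between_zeros : Prop := ∀ (numbers : List Int), Dom_sum_elements_between_zeros numbers → Spec_sum_elements_between_zeros numbers (sum_elements_between_zeros numbers)

-- ===== LEMMAS AND PROOFS =====

lemma pvFindSecondZero_ge : ∀ (k : Nat) (numbers : List Int) (i s : Nat),
    numbers.length - i ≤ k → pvFindSecondZero numbers i = some s → i ≤ s := by
  intro k
  induction k with
  | zero =>
    intro numbers i s hk h
    rw [pvFindSecondZero] at h
    split at h
    · omega
    · simp at h
  | succ k ih =>
    intro numbers i s hk h
    rw [pvFindSecondZero] at h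
    split at h
    · split at h
      · simp at h; omega
      · have := ih numbers (i + 1) s (by omega) h; omega
    · simp at h

lemma pv_drop_cons {numbers : List Int} {i : Nat} (h : i < numbers.length) :
    numbers.drop i = numbers.getD i 0 :: numbers.drop (i + 1) := by
  rw [List.drop_eq_getElem_cons h, List.getD_eq_getElem _ _ h]

-- phase with seen = 1: A's "find second zero then sum the slice" = B's accumulating loop
lemma pv_phase1 : ∀ (k : Nat) (numbers : List Int) (i : Nat) (acc : Int),
    numbers.length - i ≤ k →
    (match pvFindSecondZero numbers i with
     | none => 0
     | some s => pvSumRange numbers i s acc) = pvAltLoop (numbers.drop i) 1 acc := by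
  intro k
  induction k with
  | zero =>
    intro numbers i acc hk
    rw [pvFindSecondZero]
    have hge : ¬ i < numbers.length := by omega
    rw [List.drop_eq_nil_of_le (by omega)]
    simp [hge, pvAltLoop]
  | succ k ih =>
    intro numbers i acc hk
    by_cases h : i < numbers.length
    · rw [pv_drop_cons h, pvAltLoop, pvFindSecondZero]
      by_cases hz : numbers.getD i 0 = 0
      · simp only [h, hz, if_true, dif_pos]
        rw [pvSumRange]
        simp
      · simp only [h, hz, if_false, dif_pos]
        rw [← ih numbers (i + 1) (acc + numbers.getD i 0) (by omega)]
        cases hs : pvFindSecondZero numbers (i + 1) with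
        | none => simp
        | some s =>
          have hle : i + 1 ≤ s := pvFindSecondZero_ge (k) numbers (i + 1) s (by omega) hs
          simp only []
          rw [pvSumRange]
          simp [show i < s by omega]
    · rw [pvFindSecondZero, List.drop_eq_nil_of_le (by omega)]
      simp [h, pvAltLoop]

-- phase with seen = 0: A's "find first zero then the rest" = B's loop in state 0
lemma pv_phase0 : ∀ (k : Nat) (numbers : List Int) (i : Nat),
    numbers.length - i ≤ k →
    (match pvFindFirstZero (numbers.drop i) i with
     | none => 0
     | some f =>
       match pvFindSecondZero numbers (f + 1) with
       | none => 0
       | some s => pvSumRange numbers (f + 1) s 0) = pvAltLoop (numbers.drop i) 0 0 := by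
  intro k
  induction k with
  | zero =>
    intro numbers i hk
    rw [List.drop_eq_nil_of_le (by omega)]
    simp [pvFindFirstZero, pvAltLoop]
  | succ k ih =>
    intro numbers i hk
    by_cases h : i < numbers.length
    · rw [pv_drop_cons h, pvFindFirstZero, pvAltLoop]
      by_cases hz : numbers.getD i 0 = 0
      · simp only [hz, if_true]
        have := pv_phase1 k numbers (i + 1) 0 (by omega)
        simpa using this
      · simp only [hz, if_false]
        have := ih numbers (i + 1) (by omega)
        simpa using this
    · rw [List.drop_eq_nil_of_le (by omega)]
      simp [pvFindFirstZero, pvAltLoop]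

-- ===== VERDICT (by name: the statement is the Claim_ definition above) =====
theorem sum_elements_between_zeros_spec : Claim_equal_sum_elements_between_zeros := by
  intro numbers _
  unfold Spec_sum_elements_between_zeros sum_elements_between_zeros sum_elements_between_zeros_alt
  have := pv_phase0 numbers.length numbers 0 (by omega)
  simpa using this
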